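-- pv_equiv track=rewrite | github.com/magiecheng33/modelIdeaDiffusion | generate_isi_resources_features_sharing.py | get_end_year
-- ===== SOURCE A (Python) =====
-- def get_end_year(term_df_year):
--     term_list = []
--     term_ENDYEAR = []
--     for term in term_df_year:
--         term_list.append(term)
--         sentinal = False
--         for idx in range(len(term_df_year[term])-1, -1, -1):
--             if term_df_year[term][idx] != 0:
--                 term_ENDYEAR.append(idx+START_YEAR)
--                 sentinal = True
--                 break
--         if not sentinal:
--             term_ENDYEAR.append(END_YEAR)
--     return term_list, term_ENDYEAR
--
-- START_YEAR = 1992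
--
-- END_YEAR = 2016
-- ===== SOURCE B (Python) =====
-- START_YEAR = 1992
--
-- END_YEAR = 2016
--
-- def get_end_year(term_df_year):
--     term_list = list(term_df_year)
--     term_ENDYEAR = []
--     for term in term_list:
--         last = None
--         for idx, val in enumerate(term_df_year[term]):
--             if val != 0:
--                 last = idx
--         term_ENDYEAR.append(END_YEAR if last is None else last + START_YEAR)
--     return term_list, term_ENDYEAR
-- ===== Notes on version B (the rewrite author's own statement) =====
-- stated objective: alternative
-- what changed: B replaces A's backward index loop with sentinel flag and early break by a single forward enumerate pass folding a running last-nonzero index (Option) that is turned into the year afterwards.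
import Mathlib
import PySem

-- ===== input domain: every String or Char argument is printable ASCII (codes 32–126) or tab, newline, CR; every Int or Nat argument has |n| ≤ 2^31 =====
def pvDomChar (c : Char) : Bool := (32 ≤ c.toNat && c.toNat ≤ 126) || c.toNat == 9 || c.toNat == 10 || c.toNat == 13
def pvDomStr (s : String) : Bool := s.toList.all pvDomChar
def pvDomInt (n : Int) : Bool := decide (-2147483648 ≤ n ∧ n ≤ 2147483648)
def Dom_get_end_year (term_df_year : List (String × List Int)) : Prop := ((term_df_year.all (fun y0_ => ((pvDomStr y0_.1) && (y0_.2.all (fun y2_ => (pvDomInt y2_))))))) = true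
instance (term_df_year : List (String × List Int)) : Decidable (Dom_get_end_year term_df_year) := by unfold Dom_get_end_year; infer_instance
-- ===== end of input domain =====

-- B replaces A's backward index scan with sentinel/break by one forward enumerate pass
-- keeping the running last-nonzero index (alternative decomposition; same cost).


-- ===== PORT A =====
-- inner loop `for idx in range(len(ys)-1, -1, -1): if ys[idx] != 0: append(idx+1992); break`
-- with the `sentinal` flag: the Nat argument is idx+1 (0 = range exhausted, append END_YEAR).
-- `(… ).getD 0` only totalises pyGet?; the index k is always in range here.
def pvA_loop (ys : List Int) : Nat → Int
  | 0 => 2016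
  | Nat.succ k => if ((PySem.List.pyGet? ys (k : Int)).getD 0) ≠ 0 then (k : Int) + 1992 else pvA_loop ys k

def pvA_go : List (String × List Int) → List String × List Int
  | [] => ([], [])
  | (t, ys) :: rest =>
      let r := pvA_go rest
      (t :: r.1, pvA_loop ys ys.length :: r.2)

-- the Python argument is a dict: Dict.ofList reproduces Python's dict construction
-- (last value per key, first position); iterating its items with each key's own value
-- is exact since the items of a Dict have unique keys.
def get_end_year (term_df_year : List (String × List Int)) : List String × List Int :=
  pvA_go (PySem.Dict.ofList term_df_year).items

-- ===== PORT B =====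
-- forward pass: fold over enumerate(ys) keeping the last index with a nonzero value.
def pvB_end (ys : List Int) : Int :=
  match (PySem.List.enumerate ys).foldl (fun acc iv => if iv.2 ≠ 0 then some iv.1 else acc) (none : Option Int) with
  | some i => i + 1992
  | none => 2016

def get_end_year_alt (term_df_year : List (String × List Int)) : List String × List Int :=
  let items := (PySem.Dict.ofList term_df_year).items
  (items.map (·.1), items.map (fun p => pvB_end p.2))

-- ===== PRECONDITION & SPEC =====
def Spec_get_end_year (term_df_year : List (String × List Int)) (out : List String × List Int) : Prop := out = get_end_year_alt term_df_year
instance (term_df_year : List (String × List Int)) (out : List String × List Int) : Decidable (Spec_get_end_year term_df_year out) := by unfold Spec_get_end_year; infer_instance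

-- ===== CLAIM (what is proved, stated in full; the proofs are below) =====
def Claim_equal_get_end_year : Prop := ∀ (term_df_year : List (String × List Int)), Dom_get_end_year term_df_year → Spec_get_end_year term_df_year (get_end_year term_df_year)

-- ===== LEMMAS AND PROOFS =====

-- A's loop never looks past index k, so a trailing element is invisible below its index.
theorem pvA_loop_append (ys : List Int) (v : Int) :
    ∀ k, k ≤ ys.length → pvA_loop (ys ++ [v]) k = pvA_loop ys k := by
  intro k
  induction k with
  | zero => intro _; rfl
  | succ k ih =>
      intro hk
      have hk' : k < ys.length := Nat.lt_of_succ_le hk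
      have hget : PySem.List.pyGet? (ys ++ [v]) (k : Int) = PySem.List.pyGet? ys (k : Int) := by
        simp [PySem.List.pyGet?_natCast, List.getElem?_append_left hk']
      simp only [pvA_loop, hget]
      split_ifs with h
      · rfl
      · exact ih (Nat.le_of_lt hk')

theorem pvB_fold_append (ys : List Int) (v : Int) :
    (PySem.List.enumerate (ys ++ [v])).foldl (fun acc iv => if iv.2 ≠ 0 then some iv.1 else acc) (none : Option Int)
      = if v ≠ 0 then some (ys.length : Int)
        else (PySem.List.enumerate ys).foldl (fun acc iv => if iv.2 ≠ 0 then some iv.1 else acc) (none : Option Int) := by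
  rw [PySem.List.enumerate_append, List.foldl_append]
  simp [PySem.List.enumerate]

-- the backward scan with break and the forward last-nonzero fold agree on every row
theorem pvA_eq_pvB (ys : List Int) : pvA_loop ys ys.length = pvB_end ys := by
  induction ys using List.reverseRecOn with
  | nil => rfl
  | append_singleton ys v ih =>
      have hlen : (ys ++ [v]).length = ys.length + 1 := by simp
      have hget : PySem.List.pyGet? (ys ++ [v]) ((ys.length : Nat) : Int) = some v :=
        PySem.List.pyGet?_append_length (pre := ys) (y := v) (ys := [])
      rw [hlen]
      simp only [pvA_loop, hget, Option.getD_some, pvB_end, pvB_fold_append]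
      split_ifs with h
      · rfl
      · rw [pvA_loop_append ys v ys.length (Nat.le_refl _), ih, pvB_end]

theorem pvA_go_eq (l : List (String × List Int)) :
    pvA_go l = (l.map (·.1), l.map (fun p => pvB_end p.2)) := by
  induction l with
  | nil => rfl
  | cons p rest ih =>
      obtain ⟨t, ys⟩ := p
      simp [pvA_go, ih, pvA_eq_pvB]

-- ===== VERDICT (by name: the statement is the Claim_ definition above) =====
theorem get_end_year_spec : Claim_equal_get_end_year := by
  intro td _
  unfold Spec_get_end_year get_end_year get_end_year_alt
  exact pvA_go_eq _
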